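-- pv_equiv track=rewrite | github.com/ra7kar/interview-prep | data_structures/jumping_clouds.py | jumping_clouds
-- ===== SOURCE A (Python) =====
-- def jumping_clouds(c, k):
--
--     result = 100
--     i = 0
--     n = len(c)
--
--     while True:
--         result = result - 1 - 2 * c[i]
--         i = (i + k) % n
--         if i == 0:
--             break
--
--     return result
-- ===== SOURCE B (Python) =====
-- import math
--
-- def jumping_clouds(c, k):
--     n = len(c)
--     g = math.gcd(n, k)
--     visited = [c[i] for i in range(0, n, g)]
--     return 100 - len(visited) - 2 * sum(visited)
-- ===== Notes on version B (the rewrite author's own statement) =====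
-- stated objective: alternative
-- what changed: B does not simulate the modular walk at all: the set of clouds the walk visits is exactly the indices divisible by g = gcd(n, k), so B gathers c[0], c[g], c[2g], ... by a stride-g index range in increasing order and charges 1 + 2*cloud for each, while A repeatedly updates i = (i+k) % n until it returns to 0.
import Mathlib
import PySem

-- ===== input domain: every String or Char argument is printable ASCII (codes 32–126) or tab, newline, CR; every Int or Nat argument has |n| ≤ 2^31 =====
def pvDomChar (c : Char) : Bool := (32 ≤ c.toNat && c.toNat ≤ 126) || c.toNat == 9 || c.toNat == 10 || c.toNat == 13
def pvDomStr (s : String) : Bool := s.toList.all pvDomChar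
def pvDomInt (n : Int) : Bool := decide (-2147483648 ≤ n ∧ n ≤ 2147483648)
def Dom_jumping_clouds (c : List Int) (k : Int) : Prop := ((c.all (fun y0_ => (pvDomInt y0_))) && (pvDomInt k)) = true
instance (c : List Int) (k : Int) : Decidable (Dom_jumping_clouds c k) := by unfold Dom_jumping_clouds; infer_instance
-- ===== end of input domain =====

-- B replaces A's modular walk (i = (i+k) % n until it returns to 0) by gathering the visited
-- clouds directly: they are exactly the indices divisible by gcd(n,k), read off by a stride-g
-- index range in increasing order; same cost, a genuinely different way to enumerate the visits.


-- ===== PORT A =====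
-- the while-True loop; fuel = len(c) bounds the recursion (the walk returns to 0 within
-- len(c) steps, proved below); the fuel-exhausted branch is never reached inside Pre_
def jcLoop (c : List Int) (k : Int) (n : Int) : Nat → Int → Int → Int
  | 0, _, acc => acc
  | fuel+1, i, acc =>
      let acc' := acc - 1 - 2 * PySem.List.pyGetD c i 0
      let i' := PySem.Int.mod (i + k) n
      if i' = 0 then acc' else jcLoop c k n fuel i' acc'

def jumping_clouds (c : List Int) (k : Int) : Int :=
  let n : Int := c.length
  jcLoop c k n c.length 0 100

-- ===== PORT B =====
def jumping_clouds_alt (c : List Int) (k : Int) : Int :=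
  let n : Int := c.length
  let g : Int := Int.gcd n k
  let visited : List Int := (PySem.List.pyRange 0 n g).map (fun i => PySem.List.pyGetD c i 0)
  100 - visited.length - 2 * visited.sum

-- ===== PRECONDITION & SPEC =====
-- Pre_ excludes only the empty list, on which A raises IndexError at c[0]
def Pre_jumping_clouds (c : List Int) (k : Int) : Prop := c ≠ []
instance (c : List Int) (k : Int) : Decidable (Pre_jumping_clouds c k) := by unfold Pre_jumping_clouds; infer_instance
def pvWitness_jumping_clouds : List Int × Int := ([3, 0, 1], 2)

def Spec_jumping_clouds (c : List Int) (k : Int) (out : Int) : Prop := out = jumping_clouds_alt c k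
instance (c : List Int) (k : Int) (out : Int) : Decidable (Spec_jumping_clouds c k out) := by unfold Spec_jumping_clouds; infer_instance

-- ===== CLAIM (what is proved, stated in full; the proofs are below) =====
def Claim_equal_jumping_clouds : Prop := ∀ (c : List Int) (k : Int), Dom_jumping_clouds c k → Pre_jumping_clouds c k → Spec_jumping_clouds c k (jumping_clouds c k)

-- ===== LEMMAS AND PROOFS =====

-- value A subtracts twice at walk step t (index (t*k) % n)
def jcF (c : List Int) (k : Int) (n : Int) (t : Nat) : Int :=
  PySem.List.pyGetD c (PySem.Int.mod ((t : Int) * k) n) 0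

-- sum of jcF over walk steps j, j+1, …, j+r-1
def jcTail (c : List Int) (k : Int) (n : Int) : Nat → Nat → Int
  | _, 0 => 0
  | j, r+1 => jcF c k n j + jcTail c k n (j+1) r

-- auxiliary: with N = g*N', m = g*m', N' coprime to m':  N ∣ j*m ↔ N' ∣ j
lemma jc_dvd_aux (g N m N' m' j : Nat) (hg : 0 < g) (hN : N = g * N') (hm : m = g * m')
    (hco : Nat.Coprime N' m') : (N ∣ j * m) ↔ N' ∣ j := by
  subst hN; subst hm
  constructor
  · intro h
    have h2 : g * N' ∣ g * (j * m') := by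
      rw [show g * (j * m') = j * (g * m') by ring]; exact h
    exact hco.dvd_of_dvd_mul_right ((mul_dvd_mul_iff_left hg.ne').mp h2)
  · rintro ⟨a, ha⟩
    exact ⟨a * m', by rw [ha]; ring⟩

-- n ∣ j*k  ↔  (n / gcd(n,k)) ∣ j : the walk's period is n / gcd(n,k)
lemma jc_keyDvd (N : Nat) (k : Int) (hN : 0 < N) (j : Nat) :
    ((N : Int) ∣ (j : Int) * k) ↔ (N / Int.gcd (N : Int) k) ∣ j := by
  have hgeq : Int.gcd (N : Int) k = Nat.gcd N k.natAbs := by simp [Int.gcd]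
  rw [hgeq]
  have hg : 0 < Nat.gcd N k.natAbs :=
    Nat.pos_of_ne_zero (fun h => by have := (Nat.gcd_eq_zero_iff.mp h).1; omega)
  have h1 : ((N : Int) ∣ (j : Int) * k) ↔ N ∣ j * k.natAbs := by
    rw [← Int.dvd_natAbs, Int.natAbs_mul, Int.natAbs_natCast]
    exact_mod_cast Iff.rfl
  rw [h1]
  exact jc_dvd_aux (Nat.gcd N k.natAbs) N k.natAbs (N / Nat.gcd N k.natAbs)
    (k.natAbs / Nat.gcd N k.natAbs) j hg
    (Nat.mul_div_cancel' (Nat.gcd_dvd_left N k.natAbs)).symm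
    (Nat.mul_div_cancel' (Nat.gcd_dvd_right N k.natAbs)).symm
    (Nat.coprime_div_gcd_div_gcd hg)

-- one step of the index update: ((j*k) % n + k) % n = ((j+1)*k) % n
lemma jc_step (N : Nat) (k : Int) (hN : 0 < (N : Int)) (j : Nat) :
    PySem.Int.mod (PySem.Int.mod ((j : Int) * k) (N : Int) + k) (N : Int)
      = PySem.Int.mod (((j + 1 : Nat) : Int) * k) (N : Int) := by
  rw [PySem.Int.mod_eq_emod_of_pos hN, PySem.Int.mod_eq_emod_of_pos hN,
      PySem.Int.mod_eq_emod_of_pos hN, Int.emod_add_emod]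
  congr 1
  push_cast
  ring

-- the loop, entered at walk step j with r = steps - j iterations left, subtracts
-- 1 + 2*c[(t*k)%n] for t = j, …, j+r-1
lemma jc_loop (c : List Int) (k : Int) (hc : 0 < c.length) :
    ∀ (r j fuel : Nat) (acc : Int),
      j + r = c.length / Int.gcd (c.length : Int) k → 0 < r → r ≤ fuel →
      jcLoop c k (c.length : Int) fuel (PySem.Int.mod ((j : Int) * k) (c.length : Int)) acc
        = acc - r - 2 * jcTail c k (c.length : Int) j r := by
  intro r
  induction r with
  | zero => intro j fuel acc _ hr _; omega
  | succ r ih =>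
    intro j fuel acc hsum hr hfuel
    obtain ⟨fuel', rfl⟩ : ∃ f', fuel = f' + 1 := ⟨fuel - 1, by omega⟩
    have hNpos : (0 : Int) < (c.length : Int) := by exact_mod_cast hc
    have hmz : PySem.Int.mod (((j + 1 : Nat) : Int) * k) (c.length : Int) = 0
        ↔ (c.length / Int.gcd (c.length : Int) k) ∣ (j + 1) := by
      rw [PySem.Int.mod_eq_zero_iff_dvd]
      exact jc_keyDvd c.length k hc (j + 1)
    simp only [jcLoop, jc_step c.length k hNpos j]
    by_cases h0 : PySem.Int.mod (((j + 1 : Nat) : Int) * k) (c.length : Int) = 0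
    · have hdvd := hmz.mp h0
      have hle := Nat.le_of_dvd (by omega) hdvd
      have hr0 : r = 0 := by omega
      subst hr0
      rw [if_pos h0]
      simp only [jcTail, jcF]
      push_cast
      ring
    · have hrpos : 0 < r := by
        rcases Nat.eq_zero_or_pos r with h | h
        · exfalso
          apply h0
          apply hmz.mpr
          have hj : j + 1 = c.length / Int.gcd (c.length : Int) k := by omega
          rw [hj]
        · exact h
      rw [if_neg h0, ih (j + 1) fuel' _ (by omega) hrpos (by omega)]
      simp only [jcTail, jcF]
      push_cast
      ring

-- jcTail as a Finset sum
lemma jcTail_eq_sum (c : List Int) (k : Int) (n : Int) :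
    ∀ (r j : Nat), jcTail c k n j r = ∑ t ∈ Finset.range r, jcF c k n (j + t) := by
  intro r
  induction r with
  | zero => intro j; simp [jcTail]
  | succ r ih =>
    intro j
    rw [Finset.sum_range_succ']
    simp only [jcTail, ih (j + 1)]
    have hcg : ∀ t, jcF c k n (j + (t + 1)) = jcF c k n ((j + 1) + t) := by
      intro t; congr 1; omega
    rw [Finset.sum_congr rfl (fun t _ => hcg t)]
    simp only [Nat.add_zero]
    omega

-- two walk steps below the period reading the same index are the same step (ordered case)
lemma jc_inj_le (N : Nat) (k : Int) (hN : 0 < N) (t₁ t₂ : Nat) (hle : t₂ ≤ t₁)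
    (hlt : t₁ - t₂ < N / Int.gcd (N : Int) k)
    (h : ((t₁ : Int) * k) % (N : Int) = ((t₂ : Int) * k) % (N : Int)) : t₁ = t₂ := by
  have hdvd : ((N : Nat) : Int) ∣ ((t₁ - t₂ : Nat) : Int) * k := by
    have h0 : ((t₁ : Int) * k - (t₂ : Int) * k) % (N : Int) = 0 := by
      rw [Int.sub_emod, h, sub_self, Int.zero_emod]
    have hd := Int.dvd_of_emod_eq_zero h0
    have hcast : ((t₁ - t₂ : Nat) : Int) * k = (t₁ : Int) * k - (t₂ : Int) * k := by
      push_cast [hle]; ring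
    rw [hcast]; exact hd
  have hs := (jc_keyDvd N k hN (t₁ - t₂)).mp hdvd
  rcases Nat.eq_zero_or_pos (t₁ - t₂) with h0 | hp
  · omega
  · have := Nat.le_of_dvd hp hs; omega

-- unordered version
lemma jc_inj (N : Nat) (k : Int) (hN : 0 < N) (t₁ t₂ : Nat)
    (ht₁ : t₁ < N / Int.gcd (N : Int) k) (ht₂ : t₂ < N / Int.gcd (N : Int) k)
    (h : PySem.Int.mod ((t₁ : Int) * k) (N : Int) = PySem.Int.mod ((t₂ : Int) * k) (N : Int)) :
    t₁ = t₂ := by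
  have hNpos : (0 : Int) < (N : Int) := by exact_mod_cast hN
  rw [PySem.Int.mod_eq_emod_of_pos hNpos, PySem.Int.mod_eq_emod_of_pos hNpos] at h
  rcases le_total t₂ t₁ with hle | hle
  · exact jc_inj_le N k hN t₁ t₂ hle (by omega) h
  · exact (jc_inj_le N k hN t₂ t₁ hle (by omega) h.symm).symm

-- the walk visits each index 0, g, 2g, …, (s-1)·g exactly once: sum over walk steps
-- equals the sum over the stride-g indices in increasing order
lemma jc_sum_bij (c : List Int) (k : Int) (hc : 0 < c.length) :
    ∑ t ∈ Finset.range (c.length / Int.gcd (c.length : Int) k), jcF c k (c.length : Int) t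
      = ∑ j ∈ Finset.range (c.length / Int.gcd (c.length : Int) k),
          PySem.List.pyGetD c ((Int.gcd (c.length : Int) k : Int) * (j : Int)) 0 := by
  have hNpos : (0 : Int) < (c.length : Int) := by exact_mod_cast hc
  set gN : Nat := Int.gcd (c.length : Int) k with hgdef
  have hgpos : 0 < gN := Int.gcd_pos_iff.mpr (Or.inl (by exact_mod_cast hc.ne'))
  have hgdvdN : (gN : Int) ∣ (c.length : Int) := Int.gcd_dvd_left _ _
  have hgdvdk : (gN : Int) ∣ k := Int.gcd_dvd_right _ _
  have hgdvdNnat : gN ∣ c.length := by exact_mod_cast hgdvdN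
  set s : Nat := c.length / gN with hsdef
  set m : Nat → Int := fun t => PySem.Int.mod ((t : Int) * k) (c.length : Int) with hmdef
  have hm0 : ∀ t, 0 ≤ m t := fun t => PySem.Int.mod_nonneg _ hNpos
  have hmlt : ∀ t, m t < (c.length : Int) := fun t => PySem.Int.mod_lt _ hNpos
  have hmg : ∀ t, (gN : Int) ∣ m t := by
    intro t
    have hrep : m t = (t : Int) * k - (c.length : Int) * (((t : Int) * k) / (c.length : Int)) := by
      rw [hmdef]; simp only []
      rw [PySem.Int.mod_eq_emod_of_pos hNpos, Int.emod_def]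
    rw [hrep]
    exact dvd_sub (Dvd.dvd.mul_left hgdvdk _) (Dvd.dvd.mul_right hgdvdN _)
  have hmgnat : ∀ t, gN ∣ (m t).toNat := by
    intro t
    rcases hmg t with ⟨q, hq⟩
    have hq0 : 0 ≤ q := by
      by_contra hneg
      rw [not_le] at hneg
      have hlt0 : m t < 0 := by
        rw [hq]
        have : (gN : Int) * q ≤ (gN : Int) * (-1) :=
          mul_le_mul_of_nonneg_left (by omega) (by exact_mod_cast hgpos.le)
        omega
      exact absurd hlt0 (not_lt.mpr (hm0 t))
    refine ⟨q.toNat, ?_⟩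
    have hcast : m t = ((gN * q.toNat : Nat) : Int) := by
      rw [hq]; push_cast; rw [Int.toNat_of_nonneg hq0]
    omega
  have hmltnat : ∀ t, (m t).toNat < c.length := by
    intro t; have := hmlt t; have := hm0 t; omega
  have hmapsto : ∀ t ∈ Finset.range s, (m t).toNat / gN ∈ Finset.range s := by
    intro t _
    rw [Finset.mem_range, Nat.div_lt_iff_lt_mul hgpos, hsdef, Nat.div_mul_cancel hgdvdNnat]
    exact hmltnat t
  have hinj : ∀ t₁ ∈ Finset.range s, ∀ t₂ ∈ Finset.range s,
      (m t₁).toNat / gN = (m t₂).toNat / gN → t₁ = t₂ := by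
    intro t₁ ht₁ t₂ ht₂ heq
    rw [Finset.mem_range] at ht₁ ht₂
    have hm12 : m t₁ = m t₂ := by
      have e1 := Nat.div_mul_cancel (hmgnat t₁)
      have e2 := Nat.div_mul_cancel (hmgnat t₂)
      have h1 := hm0 t₁; have h2 := hm0 t₂
      have : (m t₁).toNat = (m t₂).toNat := by rw [← e1, ← e2, heq]
      omega
    exact jc_inj c.length k hc t₁ t₂ (by rw [← hgdef, ← hsdef]; exact ht₁)
      (by rw [← hgdef, ← hsdef]; exact ht₂) hm12
  refine Finset.sum_bij (fun t _ => (m t).toNat / gN) hmapsto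
    (fun t₁ ht₁ t₂ ht₂ heq => hinj t₁ ht₁ t₂ ht₂ heq) ?_ ?_
  · -- surjective, from injectivity and equal cardinality
    intro b hb
    obtain ⟨a, ha, hab⟩ :=
      Finset.surj_on_of_inj_on_of_card_le (s := Finset.range s) (t := Finset.range s)
        (fun t _ => (m t).toNat / gN) hmapsto
        (fun t₁ t₂ ht₁ ht₂ heq => hinj t₁ ht₁ t₂ ht₂ heq) (le_refl _) b hb
    exact ⟨a, ha, hab.symm⟩
  · -- values agree: c[(t·k) % n] = c[g · ((index)/g)] since g divides the index
    intro t _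
    simp only [jcF]
    congr 1
    have e := Nat.div_mul_cancel (hmgnat t)
    have hcast : ((gN : Nat) : Int) * (((m t).toNat / gN : Nat) : Int)
        = (((m t).toNat / gN * gN : Nat) : Int) := by push_cast; ring
    rw [hcast, e]
    exact (Int.toNat_of_nonneg (hm0 t)).symm

-- list sum over range = Finset sum over range
lemma jc_list_sum (f : Nat → Int) (n : Nat) :
    ((List.range n).map f).sum = ∑ t ∈ Finset.range n, f t := by
  induction n with
  | zero => simp
  | succ n ih => rw [List.range_succ, List.map_append, List.sum_append, Finset.sum_range_succ, ih]; simp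

-- ===== VERDICT (by name: the statement is the Claim_ definition above) =====
theorem jumping_clouds_spec : Claim_equal_jumping_clouds := by
  intro c k _ hpre
  unfold Spec_jumping_clouds Pre_jumping_clouds at *
  have hc : 0 < c.length := List.length_pos_of_ne_nil hpre
  have hNpos : (0 : Int) < (c.length : Int) := by exact_mod_cast hc
  set gN : Nat := Int.gcd (c.length : Int) k with hgdef
  have hgpos : 0 < gN := Int.gcd_pos_iff.mpr (Or.inl (by exact_mod_cast hc.ne'))
  have hgdvdNnat : gN ∣ c.length := by
    have := Int.gcd_dvd_left (a := (c.length : Int)) (b := k)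
    rwa [← hgdef, Int.natCast_dvd_natCast] at this
  set s : Nat := c.length / gN with hsdef
  have hs1 : 0 < s := Nat.div_pos (Nat.le_of_dvd hc hgdvdNnat) hgpos
  have hsN : s ≤ c.length := Nat.div_le_self _ _
  -- A's side: the loop runs exactly s iterations
  have h0 : PySem.Int.mod (((0 : Nat) : Int) * k) (c.length : Int) = 0 := by
    rw [PySem.Int.mod_eq_emod_of_pos hNpos]; simp
  have hA : jumping_clouds c k = 100 - s - 2 * ∑ t ∈ Finset.range s, jcF c k (c.length : Int) t := by
    simp only [jumping_clouds]
    rw [← h0, jc_loop c k hc s 0 c.length 100 (by rw [← hgdef, ← hsdef]; omega) hs1 hsN,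
        jcTail_eq_sum]
    simp
  -- B's side: the stride-g range lists the same indices in increasing order
  have hB : jumping_clouds_alt c k
      = 100 - s - 2 * ∑ j ∈ Finset.range s, PySem.List.pyGetD c ((gN : Int) * (j : Int)) 0 := by
    simp only [jumping_clouds_alt]
    rw [← hgdef]
    rw [PySem.List.pyRange_of_pos 0 (c.length : Int) (by exact_mod_cast hgpos)]
    rw [if_pos hNpos]
    have hcount : (((c.length : Int) - 0 + (gN : Int) - 1) / (gN : Int)).toNat = s := by
      obtain ⟨q, hq⟩ := hgdvdNnat
      have h1 : ((c.length : Int) - 0 + (gN : Int) - 1) = ((c.length + gN - 1 : Nat) : Int) := by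
        omega
      rw [h1, ← Int.natCast_ediv, Int.toNat_natCast, hsdef, hq]
      rw [show gN * q + gN - 1 = gN * q + (gN - 1) by omega]
      rw [Nat.mul_add_div hgpos, Nat.div_eq_of_lt (by omega), Nat.mul_div_cancel_left _ hgpos]
      omega
    rw [hcount, List.map_map, List.length_map, List.length_range,
        jc_list_sum ((fun i => PySem.List.pyGetD c i 0) ∘ fun j : Nat => 0 + (gN : Int) * (j : Int)) s]
    rw [Finset.sum_congr rfl (fun j _ => by
      show PySem.List.pyGetD c (0 + (gN : Int) * (j : Int)) 0 = PySem.List.pyGetD c ((gN : Int) * (j : Int)) 0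
      rw [zero_add])]
  rw [hA, hB, jc_sum_bij c k hc, ← hgdef, ← hsdef]
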